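-- pv_equiv track=rewrite | github.com/Dirtfy/AI_practice | Unet.py | channel_scheduling
-- ===== SOURCE A (Python) =====
-- def channel_scheduling(start_channel, max_channel):
--     encode_schedule_list = []
--     now_schedule = [start_channel, 64, 64]
--
--     while now_schedule[-1] < max_channel:
--         encode_schedule_list.append(now_schedule)
--
--         last_channel = now_schedule[-1]
--         now_schedule = [last_channel, last_channel*2, last_channel*2]
--
--     encode_schedule_list.append([
--         now_schedule[0],
--         now_schedule[-1]
--         ])
--
--     decode_schedule_list = [encode_schedule_list[-1][::-1]]
--     for schedule in encode_schedule_list[-2::-1]: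
--         now_schedule = schedule[::]
--         now_schedule[-1] *= 2
--         decode_schedule_list.append(now_schedule[::-1])
--     decode_schedule_list[-1][-1] = 64
--
--     return encode_schedule_list, decode_schedule_list
-- ===== SOURCE B (Python) =====
-- def channel_scheduling(start_channel, max_channel):
--     # Closed form: the recursion depth k (number of doubling steps from 64 up to
--     # max_channel) is computed directly via bit_length instead of a while loop,
--     # and both schedule lists are assembled in one top-down recursion.
--     if max_channel > 64:
--         k = (max_channel - 1).bit_length() - 6
--     else:
--         k = 0
--
--     def build(i, prev):
--         if i == k:
--             return [[prev, 64 << k]], [[64 << k, prev]]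
--         level = 64 << i
--         enc, dec = build(i + 1, level)
--         return [[prev, level, level]] + enc, dec + [[level * 2, level, prev]]
--
--     encode_schedule_list, decode_schedule_list = build(0, start_channel)
--     decode_schedule_list[-1][-1] = 64
--     return encode_schedule_list, decode_schedule_list
-- ===== Notes on version B (the rewrite author's own statement) =====
-- stated objective: alternative
-- what changed: B computes the doubling depth k in closed form from bit_length instead of running A's while loop, and assembles encode and decode together in one top-down recursion over the depth, instead of A's iterative loop followed by a second pass that copies, mutates and reverses the encode entries.
import Mathlib
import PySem

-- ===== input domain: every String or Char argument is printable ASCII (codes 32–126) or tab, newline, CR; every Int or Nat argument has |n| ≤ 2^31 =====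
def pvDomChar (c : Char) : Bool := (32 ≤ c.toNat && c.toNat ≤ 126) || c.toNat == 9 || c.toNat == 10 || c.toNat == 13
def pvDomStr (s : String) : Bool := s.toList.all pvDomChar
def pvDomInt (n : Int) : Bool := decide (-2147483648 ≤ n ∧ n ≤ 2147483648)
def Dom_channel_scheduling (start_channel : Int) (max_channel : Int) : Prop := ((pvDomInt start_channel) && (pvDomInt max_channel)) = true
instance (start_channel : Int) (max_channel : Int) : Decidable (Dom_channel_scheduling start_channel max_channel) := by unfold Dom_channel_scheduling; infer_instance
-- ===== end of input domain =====

-- B replaces A's while loop by a closed-form depth computed with bit_length and builds both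
-- schedule lists in one top-down recursion (alternative decomposition, same cost); return
-- values only, neither side mutates its arguments.

-- ===== PORT A =====

-- xs[-1] for a list that the program keeps nonempty (pyGet? is exact; default unreachable)
def pyLastI (l : List Int) : Int := (PySem.List.pyGet? l (-1)).getD 0

-- now[-1] *= 2 / decode[-1][-1] = 64 style assignment to the last slot of a nonempty list
-- (exact Python semantics of xs[-1] = v for nonempty xs)
def pySetLastI {α : Type} (l : List α) (v : α) : List α := l.dropLast ++ [v]

-- the while loop of A; fuel 64 is ample for every input in Dom (levels double from 64,
-- so at most 26 iterations before 2^31 ≥ max_channel); the fuel guard only makes it total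
def encLoopA : Nat → List (List Int) → List Int → Int → List (List Int) × List Int
  | 0, acc, now, _ => (acc, now)
  | f + 1, acc, now, mx =>
    if pyLastI now < mx then
      let last := pyLastI now
      encLoopA f (acc ++ [now]) [last, last * 2, last * 2] mx
    else (acc, now)

def channel_scheduling (start_channel : Int) (max_channel : Int) : List (List Int) × List (List Int) :=
  let r := encLoopA 64 [] [start_channel, 64, 64] max_channel
  let enc := r.1 ++ [[(PySem.List.pyGet? r.2 0).getD 0, pyLastI r.2]]
  -- enc[-1][::-1]
  let dec0 : List (List Int) := [((PySem.List.pyGet? enc (-1)).getD []).reverse]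
  -- for schedule in enc[-2::-1]: …  — enc[-2::-1] == reversed(enc[:-1]) for every list
  let dec1 := (enc.dropLast.reverse).foldl
      (fun d sched => d ++ [(pySetLastI sched (pyLastI sched * 2)).reverse]) dec0
  let dec := pySetLastI dec1 (pySetLastI ((PySem.List.pyGet? dec1 (-1)).getD []) 64)
  (enc, dec)

-- ===== PORT B =====

-- the recursion build(i, prev) of B; it runs from i to k, so the structural fuel n is k - i
-- (n = 0 is exactly Python's 'i == k' base case, where 64 << i = 64 << k);
-- Python's '64 << i' with i ≥ 0 is Lean's '<<<' (exact, see PYSEM.md SHIFTS)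
def buildB : Nat → Nat → Int → List (List Int) × List (List Int)
  | 0, i, prev => ([[prev, (64:Int) <<< i]], [[(64:Int) <<< i, prev]])
  | n + 1, i, prev =>
    let level := (64:Int) <<< i
    let r := buildB n (i + 1) level
    ([prev, level, level] :: r.1, r.2 ++ [[level * 2, level, prev]])

def channel_scheduling_alt (start_channel : Int) (max_channel : Int) : List (List Int) × List (List Int) :=
  -- (max_channel - 1).bit_length() is PySem.Int.bitLength (exact on all ints)
  let k : Int := if 64 < max_channel then (PySem.Int.bitLength (max_channel - 1) : Int) - 6 else 0
  let r := buildB k.toNat 0 start_channel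
  (r.1, pySetLastI r.2 (pySetLastI ((PySem.List.pyGet? r.2 (-1)).getD []) 64))

-- ===== PRECONDITION & SPEC =====
def Spec_channel_scheduling (start_channel : Int) (max_channel : Int) (out : List (List Int) × List (List Int)) : Prop := out = channel_scheduling_alt start_channel max_channel
instance (start_channel : Int) (max_channel : Int) (out : List (List Int) × List (List Int)) : Decidable (Spec_channel_scheduling start_channel max_channel out) := by unfold Spec_channel_scheduling; infer_instance

-- ===== CLAIM (what is proved, stated in full; the proofs are below) =====
def Claim_equal_channel_scheduling : Prop := ∀ (start_channel : Int) (max_channel : Int), Dom_channel_scheduling start_channel max_channel → Spec_channel_scheduling start_channel max_channel (channel_scheduling start_channel max_channel)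

-- ===== LEMMAS AND PROOFS =====

-- the (prev, level) pairs A's loop walks through, and the final (prev, level)
def chainT : Nat → Int → Int → Int → List (Int × Int)
  | 0, _, _, _ => []
  | f + 1, p, l, mx => if l < mx then (p, l) :: chainT f l (l * 2) mx else []

def chainF : Nat → Int → Int → Int → Int × Int
  | 0, p, l, _ => (p, l)
  | f + 1, p, l, mx => if l < mx then chainF f l (l * 2) mx else (p, l)

theorem pyLastI_append (xs : List Int) (x : Int) : pyLastI (xs ++ [x]) = x := by
  simp [pyLastI, PySem.List.pyGet?_neg_one_append_singleton]

theorem pyLastI_triple (a b c : Int) : pyLastI [a, b, c] = c := by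
  have : ([a, b, c] : List Int) = [a, b] ++ [c] := rfl
  rw [this, pyLastI_append]

theorem encLoopA_eq (f : Nat) : ∀ (p l mx : Int) (acc : List (List Int)),
    encLoopA f acc [p, l, l] mx =
      (acc ++ (chainT f p l mx).map (fun q => [q.1, q.2, q.2]),
       [(chainF f p l mx).1, (chainF f p l mx).2, (chainF f p l mx).2]) := by
  induction f with
  | zero => intro p l mx acc; simp [encLoopA, chainT, chainF]
  | succ f ih =>
    intro p l mx acc
    simp only [encLoopA, pyLastI_triple, chainT, chainF]
    by_cases h : l < mx
    · simp [if_pos h, ih]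
    · simp [if_neg h]

theorem chainT_stop (f : Nat) (p l mx : Int) (h : ¬ l < mx) : chainT f p l mx = [] := by
  cases f <;> simp [chainT, if_neg h]

theorem chainF_stop (f : Nat) (p l mx : Int) (h : ¬ l < mx) : chainF f p l mx = (p, l) := by
  cases f <;> simp [chainF, if_neg h]

-- B's recursion produces exactly A's chain data: encode triples + terminal pair,
-- and the decode list (pre-fixup) as terminal pair reversed followed by the doubled
-- triples in reverse chain order
theorem buildB_eq (mx : Int) : ∀ (n f iN : Nat) (prev : Int), n ≤ f →
    (∀ j : Nat, j < n → (64:Int) * 2 ^ (iN + j) < mx) →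
    mx ≤ 64 * 2 ^ (iN + n) →
    buildB n iN prev =
      ((chainT f prev (64 * 2 ^ iN) mx).map (fun q => [q.1, q.2, q.2])
         ++ [[(chainF f prev (64 * 2 ^ iN) mx).1, (chainF f prev (64 * 2 ^ iN) mx).2]],
       [(chainF f prev (64 * 2 ^ iN) mx).2, (chainF f prev (64 * 2 ^ iN) mx).1]
         :: ((chainT f prev (64 * 2 ^ iN) mx).map (fun q => [q.2 * 2, q.2, q.1])).reverse) := by
  intro n
  induction n with
  | zero =>
    intro f iN prev _ _ h1
    have hstop : ¬ (64 * 2 ^ iN < mx) := by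
      simpa using h1
    rw [chainT_stop f prev _ mx hstop, chainF_stop f prev _ mx hstop]
    simp [buildB, Int.shiftLeft_eq]
  | succ n ih =>
    intro f iN prev hf h2 h1
    obtain ⟨f', rfl⟩ : ∃ f', f = f' + 1 := ⟨f - 1, by omega⟩
    have hlt : (64:Int) * 2 ^ iN < mx := by simpa using h2 0 (Nat.succ_pos n)
    have hT : chainT (f' + 1) prev (64 * 2 ^ iN) mx
        = (prev, 64 * 2 ^ iN) :: chainT f' (64 * 2 ^ iN) (64 * 2 ^ iN * 2) mx := by
      simp [chainT, if_pos hlt]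
    have hFe : chainF (f' + 1) prev (64 * 2 ^ iN) mx
        = chainF f' (64 * 2 ^ iN) (64 * 2 ^ iN * 2) mx := by
      simp [chainF, if_pos hlt]
    have hpow : (64:Int) * 2 ^ iN * 2 = 64 * 2 ^ (iN + 1) := by ring
    have ih' := ih f' (iN + 1) (64 * 2 ^ iN) (by omega)
        (fun j hj => by
          have := h2 (j + 1) (by omega)
          simpa [Nat.add_assoc, Nat.add_comm 1 j] using this)
        (by
          have : iN + 1 + n = iN + (n + 1) := by omega
          rw [this]; exact h1)
    rw [hpow] at hT hFe
    simp only [buildB, Int.shiftLeft_eq, hT, hFe, ih']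
    simp

-- ==== the closed-form depth equals the loop's iteration count ====

-- for 64 < mx ≤ 2^31: K := bitLength (mx-1) - 6 satisfies the three hypotheses of buildB_eq
theorem depth_facts (mx : Int) (hmx : 64 < mx) (hdom : mx ≤ 2147483648) :
    6 < PySem.Int.bitLength (mx - 1) ∧
    PySem.Int.bitLength (mx - 1) ≤ 31 ∧
    (∀ j : Nat, j < PySem.Int.bitLength (mx - 1) - 6 → (64:Int) * 2 ^ (0 + j) < mx) ∧
    mx ≤ 64 * 2 ^ (0 + (PySem.Int.bitLength (mx - 1) - 6)) := by
  set S := PySem.Int.bitLength (mx - 1) with hS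
  have hne : mx - 1 ≠ 0 := by omega
  have habs : ((mx - 1).natAbs : Int) = mx - 1 := Int.natAbs_of_nonneg (by omega)
  have h64 : 64 ≤ (mx - 1).natAbs := by
    have : (64:Int) ≤ ((mx - 1).natAbs : Int) := by rw [habs]; omega
    exact_mod_cast this
  have hup : (mx - 1).natAbs < 2 ^ S := PySem.Int.lt_two_pow_bitLength (mx - 1)
  have hlow : 2 ^ (S - 1) ≤ (mx - 1).natAbs := PySem.Int.two_pow_bitLength_le (mx - 1) hne
  have h6S : 6 < S := by
    by_contra h
    have : (2:Nat) ^ S ≤ 2 ^ 6 := Nat.pow_le_pow_right (by norm_num) (by omega)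
    omega
  have hS31 : S ≤ 31 := by
    by_contra h
    have hlt : (mx - 1).natAbs < 2 ^ 31 := by
      have : (((mx - 1).natAbs : Int)) < 2 ^ 31 := by rw [habs]; omega
      exact_mod_cast this
    have : (2:Nat) ^ 31 ≤ 2 ^ (S - 1) := Nat.pow_le_pow_right (by norm_num) (by omega)
    omega
  refine ⟨h6S, hS31, ?_, ?_⟩
  · intro j hj
    have hjle : (2:Nat) ^ (6 + j) ≤ 2 ^ (S - 1) := Nat.pow_le_pow_right (by norm_num) (by omega)
    have : (2:Nat) ^ (6 + j) ≤ (mx - 1).natAbs := le_trans hjle hlow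
    have hZ : ((2:Int) ^ (6 + j)) ≤ mx - 1 := by
      have := (Nat.cast_le (α := Int)).2 this
      rw [habs] at this
      simpa using this
    have : (64:Int) * 2 ^ j = 2 ^ (6 + j) := by rw [pow_add]; norm_num
    simp only [Nat.zero_add]
    omega
  · have hZ : mx - 1 < ((2:Int) ^ S) := by
      have := (Nat.cast_lt (α := Int)).2 hup
      rw [habs] at this
      simpa using this
    have hSplit : (2:Int) ^ S = 64 * 2 ^ (S - 6) := by
      have : S = 6 + (S - 6) := by omega
      rw [this, pow_add]
      norm_num
    simp only [Nat.zero_add]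
    omega

theorem foldl_append_map {α β : Type} (g : α → β) (xs : List α) (init : List β) :
    xs.foldl (fun d x => d ++ [g x]) init = init ++ xs.map g :=
  PySem.List.foldl_append_singleton_eq_map g xs init

theorem channel_scheduling_eq (s mx : Int) (hdom : mx ≤ 2147483648) :
    channel_scheduling s mx = channel_scheduling_alt s mx := by
  -- the depth K that B computes, with the three facts buildB_eq needs
  obtain ⟨K, hKle, h2, h1, hk⟩ :
      ∃ K : Nat, K ≤ 64 ∧ (∀ j : Nat, j < K → (64:Int) * 2 ^ (0 + j) < mx) ∧
        mx ≤ 64 * 2 ^ (0 + K) ∧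
        ((if 64 < mx then (PySem.Int.bitLength (mx - 1) : Int) - 6 else 0) : Int).toNat = K := by
    by_cases hmx : 64 < mx
    · obtain ⟨h6S, hS31, h2, h1⟩ := depth_facts mx hmx hdom
      exact ⟨PySem.Int.bitLength (mx - 1) - 6, by omega, h2, h1, by
        rw [if_pos hmx]; omega⟩
    · exact ⟨0, by omega, by omega, by simpa using not_lt.1 hmx, by rw [if_neg hmx]; simp⟩
  have hB := buildB_eq mx K 64 0 s hKle h2 h1
  have hA := encLoopA_eq 64 s 64 mx []
  simp only [pow_zero, mul_one] at hB
  set C := chainT 64 s 64 mx with hC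
  set F := chainF 64 s 64 mx with hF
  simp only [channel_scheduling, channel_scheduling_alt, hA, hk, hB]
  -- A's terminal pair
  have hget0 : (PySem.List.pyGet? [F.1, F.2, F.2] 0).getD 0 = F.1 := by
    simp [PySem.List.pyGet?, PySem.List.pyIdx?]
  rw [hget0, pyLastI_triple]
  simp only [List.nil_append]
  -- A's enc[-1] is the terminal pair, enc[:-1] the triples
  have henc_last : (PySem.List.pyGet? (C.map (fun q => [q.1, q.2, q.2]) ++ [[F.1, F.2]]) (-1)).getD ([] : List Int)
      = [F.1, F.2] := by
    rw [PySem.List.pyGet?_neg_one_append_singleton]; rfl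
  have henc_dl : (C.map (fun q => [q.1, q.2, q.2]) ++ [[F.1, F.2]]).dropLast
      = C.map (fun q => [q.1, q.2, q.2]) := by simp
  rw [henc_last, henc_dl, foldl_append_map]
  -- A's transformed decode triples are B's
  have hmap : (C.map (fun q => [q.1, q.2, q.2])).reverse.map
        (fun sched => (pySetLastI sched (pyLastI sched * 2)).reverse)
      = (C.map (fun q => [q.2 * 2, q.2, q.1])).reverse := by
    rw [← List.map_reverse, ← List.map_reverse, List.map_map]
    apply List.map_congr_left
    intro q _
    simp [pySetLastI, pyLastI_triple, List.dropLast]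
  rw [hmap]
  rfl

-- ===== VERDICT (by name: the statement is the Claim_ definition above) =====
theorem channel_scheduling_spec : Claim_equal_channel_scheduling := by
  intro s mx hdom
  show channel_scheduling s mx = channel_scheduling_alt s mx
  have : mx ≤ 2147483648 := by
    simp only [Dom_channel_scheduling, pvDomInt, Bool.and_eq_true, decide_eq_true_eq] at hdom
    exact hdom.2.2
  exact channel_scheduling_eq s mx this
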